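-- pv_equiv track=rewrite | github.com/mikey-yang/high-coverage-translation | filtering/utils.py | read_trans_prompts
-- ===== SOURCE A (Python) =====
-- from typing import Any, Dict, List, Set, Tuple
--
-- FIELDSEP = "|"
--
-- def read_trans_prompts(lines: List[str]) -> List[Tuple[str,str]]:
--     """
--     This reads a file in the shared task format, returns a list of Tuples containing ID and text for each prompt.
--     """
--
--     ids_prompts = []
--     first = True
--     for line in lines:
--         line = line.strip().lower()
--
--         # in a group, the first one is the KEY.
--         # all others are part of the set.
--         if len(line) == 0:
--             first = True
--         else:
--             if first and line.startswith("prompt"):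
--                 key, prompt = line.split(FIELDSEP)
--                 ids_prompts.append((key, prompt))
--                 first = False
--
--     return ids_prompts
-- ===== SOURCE B (Python) =====
-- from typing import List, Tuple
--
-- FIELDSEP = "|"
--
-- def read_trans_prompts(lines: List[str]) -> List[Tuple[str, str]]:
--     """Two-phase: group normalized lines into blank-separated blocks, then take
--     the first 'prompt'-prefixed line of each block."""
--     normed = [line.strip().lower() for line in lines]
--     blocks = []
--     cur = []
--     for n in normed:
--         if len(n) == 0:
--             blocks.append(cur)
--             cur = []
--         else:
--             cur.append(n)
--     blocks.append(cur)
--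
--     ids_prompts = []
--     for block in blocks:
--         line = next((l for l in block if l.startswith("prompt")), None)
--         if line is not None:
--             key, prompt = line.split(FIELDSEP)
--             ids_prompts.append((key, prompt))
--     return ids_prompts
-- ===== Notes on version B (the rewrite author's own statement) =====
-- stated objective: alternative
-- what changed: Replaces A's single-pass loop with a stateful 'first' flag by a two-phase decomposition: first partition the normalized lines into blank-separated blocks, then scan each block for its first 'prompt'-prefixed line and split it.
import Mathlib
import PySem

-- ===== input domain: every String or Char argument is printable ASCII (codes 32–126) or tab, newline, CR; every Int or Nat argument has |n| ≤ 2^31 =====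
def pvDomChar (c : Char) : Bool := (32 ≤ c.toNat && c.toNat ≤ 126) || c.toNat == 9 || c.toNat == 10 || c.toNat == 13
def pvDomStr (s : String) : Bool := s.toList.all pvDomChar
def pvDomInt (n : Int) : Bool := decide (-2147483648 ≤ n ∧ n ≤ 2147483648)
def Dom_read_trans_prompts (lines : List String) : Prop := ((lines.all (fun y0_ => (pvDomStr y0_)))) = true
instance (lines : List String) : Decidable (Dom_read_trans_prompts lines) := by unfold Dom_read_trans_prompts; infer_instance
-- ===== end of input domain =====

-- B replaces A's single-pass 'first'-flag loop by a two-phase group-into-blocks-then-scan decomposition (objective: alternative; same cost).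


-- s.split("|"): PySem.Str.split? is none only for sep = "", so .getD [] is exact here
def pvSplit (s : String) : List String := (PySem.Str.split? s "|").getD []

-- ===== PORT A =====
-- loop 'for line in lines' with state (ids_prompts, first); on the ValueError unpack
-- (split not of length 2, excluded by Pre_) the port aborts with the partial accumulator.
def pvGoA (lines : List String) (acc : List (String × String)) (first : Bool) :
    List (String × String) :=
  match lines with
  | [] => acc
  | l :: rest =>
    let line := PySem.Str.lower (PySem.Str.strip l)
    if PySem.Str.len line == 0 then
      pvGoA rest acc true
    else
      if first && PySem.Str.startswith line "prompt" then
        match pvSplit line with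
        | [key, prompt] => pvGoA rest (acc ++ [(key, prompt)]) false
        | _ => acc      -- Python raises ValueError here; outside Pre_
      else
        pvGoA rest acc first

def read_trans_prompts (lines : List String) : List (String × String) :=
  pvGoA lines [] true

-- ===== PORT B =====
def pvNorm (l : String) : String := PySem.Str.lower (PySem.Str.strip l)

def pvIsPrompt (l : String) : Bool := PySem.Str.startswith l "prompt"

-- Source B phase 1: fold the normalized lines into blank-separated blocks (state: finished blocks, current block)
def pvBlocks (normed : List String) : List (List String) :=
  let s := normed.foldl
    (fun (s : List (List String) × List String) n =>
      if PySem.Str.len n == 0 then (s.1 ++ [s.2], []) else (s.1, s.2 ++ [n]))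
    ([], [])
  s.1 ++ [s.2]

-- Source B phase 2 body: first 'prompt'-prefixed line of the block, if any, split on "|"
def pvScanBlock (acc : List (String × String)) (b : List String) : List (String × String) :=
  match b.find? pvIsPrompt with
  | some line =>
    match pvSplit line with
    | [key, prompt] => acc ++ [(key, prompt)]
    | _ => acc        -- Python raises ValueError here; outside Pre_
  | none => acc

def read_trans_prompts_alt (lines : List String) : List (String × String) :=
  (pvBlocks (lines.map pvNorm)).foldl pvScanBlock []

-- ===== PRECONDITION & SPEC =====
-- Pre_ excludes exactly the inputs on which the Python raises ValueError: some blank-separated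
-- block whose first 'prompt'-prefixed (normalized) line does not split on "|" into exactly 2 fields.
def Pre_read_trans_prompts (lines : List String) : Prop :=
  ((pvBlocks (lines.map pvNorm)).all fun b =>
    (b.find? pvIsPrompt).all fun l => (pvSplit l).length == 2) = true

instance (lines : List String) : Decidable (Pre_read_trans_prompts lines) := by
  unfold Pre_read_trans_prompts; infer_instance

def pvWitness_read_trans_prompts : List String :=
  ["Prompt1 | Hello World", "other line", "", "no prompt here", "", "prompt2|bye"]

def Spec_read_trans_prompts (lines : List String) (out : List (String × String)) : Prop := out = read_trans_prompts_alt lines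
instance (lines : List String) (out : List (String × String)) : Decidable (Spec_read_trans_prompts lines out) := by unfold Spec_read_trans_prompts; infer_instance

-- ===== CLAIM (what is proved, stated in full; the proofs are below) =====
def Claim_equal_read_trans_prompts : Prop := ∀ (lines : List String), Dom_read_trans_prompts lines → Pre_read_trans_prompts lines → Spec_read_trans_prompts lines (read_trans_prompts lines)

-- ===== LEMMAS AND PROOFS =====

-- reference recursion for the block structure (always carries the trailing block)
def pvSB : List String → List (List String)
  | [] => [[]]
  | n :: rest =>
    if n = "" then [] :: pvSB rest
    else
      match pvSB rest with
      | b :: bs => (n :: b) :: bs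
      | [] => [[n]]

-- A's loop on the pre-normalized lines
def pvGoN (ns : List String) (acc : List (String × String)) (first : Bool) :
    List (String × String) :=
  match ns with
  | [] => acc
  | n :: rest =>
    if PySem.Str.len n == 0 then
      pvGoN rest acc true
    else
      if first && pvIsPrompt n then
        match pvSplit n with
        | [key, prompt] => pvGoN rest (acc ++ [(key, prompt)]) false
        | _ => acc
      else
        pvGoN rest acc first

lemma pvBlank_false {s : String} (h : s ≠ "") : (PySem.Str.len s == 0) = false := by
  simpa using h

lemma pvGoA_eq_goN (lines : List String) (acc : List (String × String)) (first : Bool) :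
    pvGoA lines acc first = pvGoN (lines.map pvNorm) acc first := by
  induction lines generalizing acc first with
  | nil => rfl
  | cons l rest ih =>
    simp only [pvGoA, pvGoN, List.map, pvNorm, pvIsPrompt]
    split
    · exact ih _ _
    · split
      · split
        · exact ih _ _
        · rfl
      · exact ih _ _

lemma pvSB_ne_nil (ns : List String) : pvSB ns ≠ [] := by
  cases ns with
  | nil => simp [pvSB]
  | cons n rest =>
    simp only [pvSB]
    split
    · simp
    · split <;> simp

lemma pvBlocks_go (ns : List String) :
    ∀ (blocks : List (List String)) (cur : List String),
      (let s := ns.foldl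
        (fun (s : List (List String) × List String) n =>
          if PySem.Str.len n == 0 then (s.1 ++ [s.2], []) else (s.1, s.2 ++ [n]))
        (blocks, cur)
       s.1 ++ [s.2]) =
      blocks ++ (match pvSB ns with
                 | b :: bs => (cur ++ b) :: bs
                 | [] => [cur]) := by
  induction ns with
  | nil => intro blocks cur; simp [pvSB]
  | cons n rest ih =>
    intro blocks cur
    obtain ⟨b, bs, hbs⟩ : ∃ b bs, pvSB rest = b :: bs := by
      cases hr : pvSB rest with
      | nil => exact absurd hr (pvSB_ne_nil rest)
      | cons b bs => exact ⟨b, bs, rfl⟩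
    by_cases h : n = ""
    · have hstep : (fun (s : List (List String) × List String) n =>
          if PySem.Str.len n == 0 then (s.1 ++ [s.2], []) else (s.1, s.2 ++ [n]))
          (blocks, cur) n = (blocks ++ [cur], []) := by
        simp [h]
      simp only [List.foldl_cons, hstep]
      rw [ih]
      simp [pvSB, h, hbs]
    · have hstep : (fun (s : List (List String) × List String) n =>
          if PySem.Str.len n == 0 then (s.1 ++ [s.2], []) else (s.1, s.2 ++ [n]))
          (blocks, cur) n = (blocks, cur ++ [n]) := by
        simp [h]
      simp only [List.foldl_cons, hstep]
      rw [ih]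
      simp [pvSB, h, hbs]

lemma pvBlocks_eq_SB (ns : List String) : pvBlocks ns = pvSB ns := by
  have h := pvBlocks_go ns [] []
  simp only [pvBlocks]
  rw [h]
  obtain ⟨b, bs, hbs⟩ : ∃ b bs, pvSB ns = b :: bs := by
    cases hr : pvSB ns with
    | nil => exact absurd hr (pvSB_ne_nil ns)
    | cons b bs => exact ⟨b, bs, rfl⟩
  simp [hbs]

-- per-block goodness: the first prompt line (if any) splits into exactly two fields
def pvOkb (b : List String) : Prop :=
  ∀ l, b.find? pvIsPrompt = some l → (pvSplit l).length = 2

-- with the flag already false, nonblank lines are all skipped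
lemma pvGoN_false (b : List String) (hb : ∀ l ∈ b, l ≠ "") :
    ∀ (rest : List String) (acc : List (String × String)),
      pvGoN (b ++ rest) acc false = pvGoN rest acc false := by
  induction b with
  | nil => intro rest acc; rfl
  | cons n b' ih =>
    intro rest acc
    have hn := pvBlank_false (hb n (by simp))
    simp only [List.cons_append, pvGoN, hn, Bool.false_and, Bool.false_eq_true,
      not_false_eq_true, if_neg]
    exact ih (fun l hl => hb l (by simp [hl])) rest acc

-- processing one all-nonblank block with the flag true
lemma pvGoN_block (b : List String) (hb : ∀ l ∈ b, l ≠ "") (hok : pvOkb b) :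
    ∀ (rest : List String) (acc : List (String × String)),
      pvGoN (b ++ rest) acc true = pvGoN rest (pvScanBlock acc b) (!(b.find? pvIsPrompt).isSome) := by
  induction b with
  | nil => intro rest acc; simp [pvScanBlock]
  | cons n b' ih =>
    intro rest acc
    have hn := pvBlank_false (hb n (by simp))
    by_cases hp : pvIsPrompt n = true
    · have hfind : (n :: b').find? pvIsPrompt = some n := by simp [List.find?_cons_of_pos, hp]
      have hlen : (pvSplit n).length = 2 := hok n hfind
      obtain ⟨k, p, hkp⟩ : ∃ k p, pvSplit n = [k, p] := by
        cases hs : pvSplit n with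
        | nil => rw [hs] at hlen; simp at hlen
        | cons a t =>
          cases t with
          | nil => rw [hs] at hlen; simp at hlen
          | cons c u =>
            cases u with
            | nil => exact ⟨a, c, rfl⟩
            | cons d v => rw [hs] at hlen; simp at hlen
      simp only [List.cons_append, pvGoN, hn, Bool.false_eq_true, not_false_eq_true, if_neg,
        hp, Bool.true_and, if_pos, hkp]
      rw [pvGoN_false b' (fun l hl => hb l (by simp [hl]))]
      simp [pvScanBlock, hfind, hkp]
    · have hp' : pvIsPrompt n = false := by simpa using hp
      have hfind : (n :: b').find? pvIsPrompt = b'.find? pvIsPrompt := by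
        simp [hp']
      have hscan : pvScanBlock acc (n :: b') = pvScanBlock acc b' := by
        simp [pvScanBlock, hfind]
      simp only [List.cons_append, pvGoN, hn, Bool.false_eq_true, not_false_eq_true, if_neg,
        hp', Bool.and_false, hfind, hscan]
      exact ih (fun l hl => hb l (by simp [hl])) (fun l hl => hok l (by rw [hfind]; exact hl))
        rest acc

lemma pvSB_all_nonblank (b : List String) (hb : ∀ l ∈ b, l ≠ "") :
    pvSB b = [b] := by
  induction b with
  | nil => rfl
  | cons n b' ih =>
    have hn := hb n (by simp)
    simp [pvSB, hn, ih (fun l hl => hb l (by simp [hl]))]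

lemma pvSB_append_blank (b : List String) (hb : ∀ l ∈ b, l ≠ "")
    (h : String) (hh : h = "") (r : List String) :
    pvSB (b ++ h :: r) = b :: pvSB r := by
  induction b with
  | nil => simp [pvSB, hh]
  | cons n b' ih =>
    have hn := hb n (by simp)
    simp [pvSB, hn, ih (fun l hl => hb l (by simp [hl]))]

lemma pvDropWhile_head (p : String → Bool) :
    ∀ (ns : List String), ns.dropWhile p = [] ∨
      ∃ h t, ns.dropWhile p = h :: t ∧ p h = false := by
  intro ns
  induction ns with
  | nil => left; rfl
  | cons n rest ih =>
    by_cases hp : p n = true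
    · simpa [hp] using ih
    · right; exact ⟨n, rest, by simp [List.dropWhile_cons, hp], by simpa using hp⟩

-- the main loop = fold of pvScanBlock over the blocks
lemma pvMain : ∀ (fuel : Nat) (ns : List String), ns.length ≤ fuel →
    (∀ b ∈ pvSB ns, pvOkb b) → ∀ (acc : List (String × String)),
    pvGoN ns acc true = (pvSB ns).foldl pvScanBlock acc := by
  intro fuel
  induction fuel with
  | zero =>
    intro ns hlen _ acc
    have : ns = [] := List.length_eq_zero_iff.mp (Nat.le_zero.mp hlen)
    subst this; simp [pvSB, pvGoN, pvScanBlock]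
  | succ fuel ih =>
    intro ns hlen hgood acc
    cases hns : ns with
    | nil => simp [pvSB, pvGoN, pvScanBlock]
    | cons n rest =>
      subst hns
      by_cases hn : n = ""
      · have hsb : pvSB (n :: rest) = [] :: pvSB rest := by simp [pvSB, hn]
        have h1 : pvGoN (n :: rest) acc true = pvGoN rest acc true := by
          simp [pvGoN, hn]
        rw [h1, hsb, List.foldl_cons]
        have hscan : pvScanBlock acc [] = acc := by simp [pvScanBlock]
        rw [hscan]
        exact ih rest (by simpa using Nat.le_of_succ_le_succ hlen)
          (fun b hb => hgood b (by rw [hsb]; exact List.mem_cons_of_mem _ hb)) acc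
      · have hsplit : (n :: rest).takeWhile (fun l => l != "") ++
            (n :: rest).dropWhile (fun l => l != "") = n :: rest :=
          List.takeWhile_append_dropWhile
        have hball : ∀ l ∈ (n :: rest).takeWhile (fun l => l != ""), l ≠ "" := by
          intro l hl
          simpa using List.mem_takeWhile_imp hl
        rcases pvDropWhile_head (fun l => l != "") (n :: rest) with hre | ⟨h, t, hre, hph⟩
        · have hsb : pvSB (n :: rest) = [(n :: rest).takeWhile (fun l => l != "")] := by
            conv_lhs => rw [← hsplit, hre, List.append_nil]
            exact pvSB_all_nonblank _ hball
          have hok : pvOkb ((n :: rest).takeWhile (fun l => l != "")) :=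
            hgood _ (by rw [hsb]; simp)
          conv_lhs => rw [← hsplit, hre]
          rw [pvGoN_block _ hball hok [] acc, hsb]
          simp [pvGoN]
        · have hh : h = "" := by simpa using hph
          have hsb : pvSB (n :: rest) = (n :: rest).takeWhile (fun l => l != "") :: pvSB t := by
            conv_lhs => rw [← hsplit, hre]
            exact pvSB_append_blank _ hball h hh t
          have hok : pvOkb ((n :: rest).takeWhile (fun l => l != "")) :=
            hgood _ (by rw [hsb]; simp)
          conv_lhs => rw [← hsplit, hre]
          rw [pvGoN_block _ hball hok (h :: t) acc, hsb, List.foldl_cons]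
          have h2 : ∀ fl, pvGoN (h :: t) (pvScanBlock acc ((n :: rest).takeWhile (fun l => l != ""))) fl =
              pvGoN t (pvScanBlock acc ((n :: rest).takeWhile (fun l => l != ""))) true := by
            intro fl; simp [pvGoN, hh]
          rw [h2]
          have hlt : t.length ≤ fuel := by
            have hl2 := congrArg List.length hsplit
            rw [hre] at hl2
            simp only [List.length_append, List.length_cons] at hl2 hlen
            omega
          exact ih t hlt
            (fun bb hbb => hgood bb (by rw [hsb]; exact List.mem_cons_of_mem _ hbb)) _

-- ===== VERDICT (by name: the statement is the Claim_ definition above) =====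
theorem read_trans_prompts_spec : Claim_equal_read_trans_prompts := by
  intro lines _ hpre
  unfold Spec_read_trans_prompts read_trans_prompts read_trans_prompts_alt
  rw [pvGoA_eq_goN, pvBlocks_eq_SB]
  apply pvMain (lines.map pvNorm).length _ le_rfl
  intro b hb l hl
  unfold Pre_read_trans_prompts at hpre
  rw [pvBlocks_eq_SB] at hpre
  rw [List.all_eq_true] at hpre
  have := hpre b hb
  rw [hl] at this
  simpa using this
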